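-- pv_equiv track=rewrite | github.com/anatolyburtsev/advent-of-code | 2024/day13/main2.py | find_positive_solutions
-- ===== SOURCE A (Python) =====
-- def extended_gcd(a, b):
--     if b == 0:
--         return a, 1, 0
--     g, x1, y1 = extended_gcd(b, a % b)
--     x = y1
--     y = x1 - (a // b) * y1
--     return g, x, y
--
-- def solve_diophantine(a, b, c):
--     g, x0, y0 = extended_gcd(abs(a), abs(b))
--     if c % g != 0:  # No solution exists
--         return None
--     # Scale the particular solution by c / g
--     x0 *= c // g
--     y0 *= c // g
--     if a < 0: x0 = -x0
--     if b < 0: y0 = -y0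
--     # General solution: x = x0 + k * (b / g), y = y0 - k * (a / g)
--     return g, x0, y0
--
-- def find_positive_solutions(a1, b1, c1, a2, b2, c2):
--     solutions = []
--     g1, x1, y1 = solve_diophantine(a1, b1, c1)
--     g2, x2, y2 = solve_diophantine(a2, b2, c2)
--
--     if g1 is None or g2 is None:
--         return solutions  # No solutions
--
--     # Iterate over k1, k2 ranges to find valid solutions
--     for k1 in range(-1000000, 1000000):  # Adjust range as needed
--         x = x1 + k1 * b1 // g1
--         y = y1 - k1 * a1 // g1
--         if x > 0 and y > 0:  # Positive solution
--             # Check against second equation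
--             if a2 * x + b2 * y == c2:
--                 solutions.append((x, y))
--     return solutions
-- ===== SOURCE B (Python) =====
-- def find_positive_solutions(a1, b1, c1, a2, b2, c2):
--     # Iterative extended gcd on (|a1|, |b1|) (same Bezout pair as the recursive one).
--     old_r, r = abs(a1), abs(b1)
--     old_s, s = 1, 0
--     old_t, t = 0, 1
--     while r:
--         q = old_r // r
--         old_r, r = r, old_r - q * r
--         old_s, s = s, old_s - q * s
--         old_t, t = t, old_t - q * t
--     g = old_r
--     if g == 0 or c1 % g != 0:
--         return []
--     scale = c1 // g
--     x1 = old_s * scale * (-1 if a1 < 0 else 1)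
--     y1 = old_t * scale * (-1 if b1 < 0 else 1)
--     sx = b1 // g
--     sy = a1 // g
--     # Solutions of eq1 correspond to k in the scan window: x = x1 + k*sx, y = y1 - k*sy.
--     d = a2 * sx - b2 * sy
--     rr = c2 - a2 * x1 - b2 * y1
--     LO, HI = -1000000, 999999
--     if d != 0:
--         # eq2 pins down a unique k
--         if rr % d != 0:
--             return []
--         k = rr // d
--         x, y = x1 + k * sx, y1 - k * sy
--         return [(x, y)] if (LO <= k <= HI and x > 0 and y > 0) else []
--     if rr != 0:
--         return []
--     # eq2 holds for every k: positivity cuts the window to one interval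
--     lo, hi = LO, HI
--     if sx > 0:
--         lo = max(lo, -x1 // sx + 1)
--     elif sx < 0:
--         hi = min(hi, (x1 - 1) // (-sx))
--     elif x1 <= 0:
--         return []
--     if sy > 0:
--         hi = min(hi, (y1 - 1) // sy)
--     elif sy < 0:
--         lo = max(lo, (-y1) // (-sy) + 1)
--     elif y1 <= 0:
--         return []
--     return [(x1 + k * sx, y1 - k * sy) for k in range(lo, hi + 1)]
-- ===== Notes on version B (the rewrite author's own statement) =====
-- stated objective: faster
-- what changed: A scans a fixed window of 2,000,000 candidate k values (with a recursive extended gcd); B uses an iterative extended gcd and solves for k directly: when a2*sx - b2*sy != 0 the second equation pins down a single candidate k (O(1)), otherwise positivity constraints cut the window to one interval computed by floor-division range arithmetic (O(|output|)).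
-- crash fix: On inputs where gcd(a1,b1)=0 or gcd(a2,b2)=0 (ZeroDivisionError in c % g) or where a gcd does not divide its c (solve_diophantine returns None and the caller's tuple unpacking raises TypeError), A raises while B returns []. — e.g. on find_positive_solutions(2, 4, 3, 1, 1, 1): A raises TypeError, B returns []
import Mathlib
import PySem

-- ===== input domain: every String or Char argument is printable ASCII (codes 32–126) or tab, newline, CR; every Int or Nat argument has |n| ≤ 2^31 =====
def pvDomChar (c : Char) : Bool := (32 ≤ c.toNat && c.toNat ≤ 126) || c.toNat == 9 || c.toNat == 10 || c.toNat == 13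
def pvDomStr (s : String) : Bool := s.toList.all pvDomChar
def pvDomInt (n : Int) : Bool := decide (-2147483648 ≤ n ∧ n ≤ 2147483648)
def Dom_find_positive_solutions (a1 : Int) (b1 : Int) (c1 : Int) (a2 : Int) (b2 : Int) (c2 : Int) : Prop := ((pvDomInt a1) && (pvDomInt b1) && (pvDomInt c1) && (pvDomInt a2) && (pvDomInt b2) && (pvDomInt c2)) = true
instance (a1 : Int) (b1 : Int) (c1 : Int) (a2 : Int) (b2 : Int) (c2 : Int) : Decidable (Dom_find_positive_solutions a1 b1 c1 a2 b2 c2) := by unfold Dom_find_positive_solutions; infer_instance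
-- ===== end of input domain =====

-- B replaces A's fixed 2e6-iteration scan over k by solving for k directly (a single candidate k
-- when the second equation pins it down, an interval of k otherwise).

-- ===== PORT A =====
-- extended_gcd, recursive as in Python; the fuel argument (|b|+1 at the call site) only makes the
-- Euclidean recursion structurally total — it is never exhausted (|a % b| < |b|).
def pvEgcdAF (fuel : Nat) (a b : Int) : Int × Int × Int :=
  match fuel with
  | 0 => (a, 1, 0)
  | fuel + 1 =>
    if b = 0 then (a, 1, 0)
    else
      let r := pvEgcdAF fuel b (PySem.Int.mod a b)
      (r.1, r.2.2, r.2.1 - PySem.Int.floordiv a b * r.2.2)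

def pvEgcdA (a b : Int) : Int × Int × Int := pvEgcdAF (b.natAbs + 1) a b

def pvSolveDio (a b c : Int) : Option (Int × Int × Int) :=
  let e := pvEgcdA (a.natAbs : Int) (b.natAbs : Int)
  let g := e.1
  if PySem.Int.mod c g ≠ 0 then none
  else
    let x0 := e.2.1 * PySem.Int.floordiv c g
    let y0 := e.2.2 * PySem.Int.floordiv c g
    let x0 := if a < 0 then -x0 else x0
    let y0 := if b < 0 then -y0 else y0
    some (g, x0, y0)

def find_positive_solutions (a1 : Int) (b1 : Int) (c1 : Int) (a2 : Int) (b2 : Int) (c2 : Int) : List (Int × Int) :=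
  match pvSolveDio a1 b1 c1, pvSolveDio a2 b2 c2 with
  | some (g1, x1, y1), some (_g2, _x2, _y2) =>
    (PySem.List.pyRange (-1000000) 1000000 1).foldl
      (fun solutions k1 =>
        let x := x1 + PySem.Int.floordiv (k1 * b1) g1
        let y := y1 - PySem.Int.floordiv (k1 * a1) g1
        if 0 < x ∧ 0 < y then
          if a2 * x + b2 * y = c2 then solutions ++ [(x, y)] else solutions
        else solutions) []
  | _, _ => []  -- Python raises here (unpacking None); excluded by Pre_

-- ===== PORT B =====
-- iterative extended gcd (Source B's while loop); fuel (= |r1|+1 at the call site) is only a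
-- structural-totality guard, never exhausted.
def pvEgcdLoopF (fuel : Nat) (r0 r1 s0 s1 t0 t1 : Int) : Int × Int × Int :=
  match fuel with
  | 0 => (r0, s0, t0)
  | fuel + 1 =>
    if r1 = 0 then (r0, s0, t0)
    else
      let q := PySem.Int.floordiv r0 r1
      pvEgcdLoopF fuel r1 (r0 - q * r1) s1 (s0 - q * s1) t1 (t0 - q * t1)

def pvEgcdLoop (r0 r1 s0 s1 t0 t1 : Int) : Int × Int × Int :=
  pvEgcdLoopF (r1.natAbs + 1) r0 r1 s0 s1 t0 t1

def find_positive_solutions_alt (a1 : Int) (b1 : Int) (c1 : Int) (a2 : Int) (b2 : Int) (c2 : Int) : List (Int × Int) :=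
  let e := pvEgcdLoop (a1.natAbs : Int) (b1.natAbs : Int) 1 0 0 1
  let g := e.1
  if g = 0 ∨ PySem.Int.mod c1 g ≠ 0 then []
  else
    let scale := PySem.Int.floordiv c1 g
    let x1 := e.2.1 * scale * (if a1 < 0 then -1 else 1)
    let y1 := e.2.2 * scale * (if b1 < 0 then -1 else 1)
    let sx := PySem.Int.floordiv b1 g
    let sy := PySem.Int.floordiv a1 g
    let d := a2 * sx - b2 * sy
    let rr := c2 - a2 * x1 - b2 * y1
    if d ≠ 0 then
      if PySem.Int.mod rr d ≠ 0 then []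
      else
        let k := PySem.Int.floordiv rr d
        let x := x1 + k * sx
        let y := y1 - k * sy
        if -1000000 ≤ k ∧ k ≤ 999999 ∧ 0 < x ∧ 0 < y then [(x, y)] else []
    else if rr ≠ 0 then []
    else
      let xbound : Option (Int × Int) :=
        if 0 < sx then some (max (-1000000) (PySem.Int.floordiv (-x1) sx + 1), 999999)
        else if sx < 0 then some (-1000000, min 999999 (PySem.Int.floordiv (x1 - 1) (-sx)))
        else if x1 ≤ 0 then none
        else some (-1000000, 999999)
      match xbound with
      | none => []
      | some (lo, hi) =>
        let bounds : Option (Int × Int) :=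
          if 0 < sy then some (lo, min hi (PySem.Int.floordiv (y1 - 1) sy))
          else if sy < 0 then some (max lo (PySem.Int.floordiv (-y1) (-sy) + 1), hi)
          else if y1 ≤ 0 then none
          else some (lo, hi)
        match bounds with
        | none => []
        | some (lo, hi) =>
          (PySem.List.pyRange lo (hi + 1) 1).map (fun k => (x1 + k * sx, y1 - k * sy))

-- ===== PRECONDITION & SPEC =====
-- Pre_ excludes exactly the inputs on which the Python A raises: gcd(a1,b1)=0 or gcd(a2,b2)=0
-- (ZeroDivisionError in `c % g`), or a gcd that does not divide its c (solve_diophantine returns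
-- None, which the caller's tuple unpacking turns into a TypeError).
def Pre_find_positive_solutions (a1 : Int) (b1 : Int) (c1 : Int) (a2 : Int) (b2 : Int) (c2 : Int) : Prop :=
  ¬(a1 = 0 ∧ b1 = 0) ∧ ¬(a2 = 0 ∧ b2 = 0) ∧ (Int.gcd a1 b1 : Int) ∣ c1 ∧ (Int.gcd a2 b2 : Int) ∣ c2
instance (a1 : Int) (b1 : Int) (c1 : Int) (a2 : Int) (b2 : Int) (c2 : Int) : Decidable (Pre_find_positive_solutions a1 b1 c1 a2 b2 c2) := by unfold Pre_find_positive_solutions; infer_instance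

def pvWitness_find_positive_solutions : Int × Int × Int × Int × Int × Int := (2, 4, 6, 1, 1, 1)

-- On inputs where A raises (ZeroDivisionError when a1=b1=0 or a2=b2=0; TypeError unpacking None
-- when a gcd does not divide its c), B returns [].
def Raises_find_positive_solutions (a1 : Int) (b1 : Int) (c1 : Int) (a2 : Int) (b2 : Int) (c2 : Int) : Prop :=
  (a1 = 0 ∧ b1 = 0) ∨ (a2 = 0 ∧ b2 = 0) ∨ ¬((Int.gcd a1 b1 : Int) ∣ c1) ∨ ¬((Int.gcd a2 b2 : Int) ∣ c2)
instance (a1 : Int) (b1 : Int) (c1 : Int) (a2 : Int) (b2 : Int) (c2 : Int) : Decidable (Raises_find_positive_solutions a1 b1 c1 a2 b2 c2) := by unfold Raises_find_positive_solutions; infer_instance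
def pvRaiseWitness_find_positive_solutions : Int × Int × Int × Int × Int × Int := (2, 4, 3, 1, 1, 1)
def pvRaiseWitnessOut_find_positive_solutions : List (Int × Int) := []

def Spec_find_positive_solutions (a1 : Int) (b1 : Int) (c1 : Int) (a2 : Int) (b2 : Int) (c2 : Int) (out : List (Int × Int)) : Prop := out = find_positive_solutions_alt a1 b1 c1 a2 b2 c2
instance (a1 : Int) (b1 : Int) (c1 : Int) (a2 : Int) (b2 : Int) (c2 : Int) (out : List (Int × Int)) : Decidable (Spec_find_positive_solutions a1 b1 c1 a2 b2 c2 out) := by unfold Spec_find_positive_solutions; infer_instance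

-- ===== CLAIM (what is proved, stated in full; the proofs are below) =====
def Claim_equal_find_positive_solutions : Prop := ∀ (a1 : Int) (b1 : Int) (c1 : Int) (a2 : Int) (b2 : Int) (c2 : Int), Dom_find_positive_solutions a1 b1 c1 a2 b2 c2 → Pre_find_positive_solutions a1 b1 c1 a2 b2 c2 → Spec_find_positive_solutions a1 b1 c1 a2 b2 c2 (find_positive_solutions a1 b1 c1 a2 b2 c2)
def Claim_raises_find_positive_solutions : Prop := (∀ (a1 : Int) (b1 : Int) (c1 : Int) (a2 : Int) (b2 : Int) (c2 : Int), Dom_find_positive_solutions a1 b1 c1 a2 b2 c2 → Raises_find_positive_solutions a1 b1 c1 a2 b2 c2 → ¬ Pre_find_positive_solutions a1 b1 c1 a2 b2 c2) ∧ (Dom_find_positive_solutions (pvRaiseWitness_find_positive_solutions.1) (pvRaiseWitness_find_positive_solutions.2.1) (pvRaiseWitness_find_positive_solutions.2.2.1) (pvRaiseWitness_find_positive_solutions.2.2.2.1) (pvRaiseWitness_find_positive_solutions.2.2.2.2.1) (pvRaiseWitness_find_positive_solutions.2.2.2.2.2) ∧ Raises_find_positive_solutions (pvRaiseWitness_find_positive_solutions.1)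 (pvRaiseWitness_find_positive_solutions.2.1) (pvRaiseWitness_find_positive_solutions.2.2.1) (pvRaiseWitness_find_positive_solutions.2.2.2.1) (pvRaiseWitness_find_positive_solutions.2.2.2.2.1) (pvRaiseWitness_find_positive_solutions.2.2.2.2.2) ∧ find_positive_solutions_alt (pvRaiseWitness_find_positive_solutions.1) (pvRaiseWitness_find_positive_solutions.2.1) (pvRaiseWitness_find_positive_solutions.2.2.1) (pvRaiseWitness_find_positive_solutions.2.2.2.1) (pvRaiseWitness_find_positive_solutions.2.2.2.2.1) (pvRaiseWitness_find_positive_solutions.2.2.2.2.2) = pvRaiseWitnessOut_find_positive_solutions)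

-- ===== LEMMAS AND PROOFS =====

theorem pvModAbsLt (a b : Int) (hb : b ≠ 0) : (PySem.Int.mod a b).natAbs < b.natAbs := by
  rcases lt_or_gt_of_ne hb with h | h
  · have := PySem.Int.mod_neg_bounds a h; omega
  · have h1 := PySem.Int.mod_nonneg a h
    have h2 := PySem.Int.mod_lt a h
    omega

theorem pvGcdModRec (a b : Int) : Int.gcd b (PySem.Int.mod a b) = Int.gcd a b := by
  have hm := PySem.Int.floordiv_mul_add_mod a b
  apply Nat.dvd_antisymm
  · apply Int.dvd_gcd
    · have h1 : (Int.gcd b (PySem.Int.mod a b) : Int) ∣ b := Int.gcd_dvd_left _ _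
      have h2 : (Int.gcd b (PySem.Int.mod a b) : Int) ∣ PySem.Int.mod a b := Int.gcd_dvd_right _ _
      have h3 := dvd_add (h1.mul_left (PySem.Int.floordiv a b)) h2
      rwa [hm] at h3
    · exact Int.gcd_dvd_left _ _
  · apply Int.dvd_gcd
    · exact Int.gcd_dvd_right _ _
    · have h1 : (Int.gcd a b : Int) ∣ a := Int.gcd_dvd_left _ _
      have h2 : (Int.gcd a b : Int) ∣ b := Int.gcd_dvd_right _ _
      have h3 := dvd_sub h1 (h2.mul_left (PySem.Int.floordiv a b))
      have h4 : a - PySem.Int.floordiv a b * b = PySem.Int.mod a b := by omega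
      rwa [h4] at h3

theorem pvEgcdAF_fst (fuel : Nat) : ∀ (a b : Int), b.natAbs < fuel → 0 ≤ a → 0 ≤ b →
    (pvEgcdAF fuel a b).1 = (Int.gcd a b : Int) := by
  induction fuel with
  | zero => intro a b h; omega
  | succ n ih =>
    intro a b h ha hb
    by_cases hb0 : b = 0
    · subst hb0
      simp only [pvEgcdAF]
      simp [Int.gcd]
      exact (abs_of_nonneg ha).symm
    · simp only [pvEgcdAF, hb0, if_false]
      have hbpos : 0 < b := by omega
      have h1 : (pvEgcdAF n b (PySem.Int.mod a b)).1 = (Int.gcd b (PySem.Int.mod a b) : Int) :=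
        ih b (PySem.Int.mod a b) (by have := pvModAbsLt a b hb0; omega) hb
          (PySem.Int.mod_nonneg a hbpos)
      rw [h1, pvGcdModRec]

theorem pvEgcdA_fst (a b : Int) (ha : 0 ≤ a) (hb : 0 ≤ b) : (pvEgcdA a b).1 = (Int.gcd a b : Int) :=
  pvEgcdAF_fst (b.natAbs + 1) a b (by omega) ha hb

theorem pvEgcdLoop_eq (r0 r1 s0 s1 t0 t1 : Int) :
    pvEgcdLoop r0 r1 s0 s1 t0 t1 =
      ((pvEgcdA r0 r1).1,
       s0 * (pvEgcdA r0 r1).2.1 + s1 * (pvEgcdA r0 r1).2.2,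
       t0 * (pvEgcdA r0 r1).2.1 + t1 * (pvEgcdA r0 r1).2.2) := by
  have key : ∀ (fuel : Nat) (r0 r1 s0 s1 t0 t1 : Int), r1.natAbs < fuel →
      pvEgcdLoopF fuel r0 r1 s0 s1 t0 t1 =
        ((pvEgcdAF fuel r0 r1).1,
         s0 * (pvEgcdAF fuel r0 r1).2.1 + s1 * (pvEgcdAF fuel r0 r1).2.2,
         t0 * (pvEgcdAF fuel r0 r1).2.1 + t1 * (pvEgcdAF fuel r0 r1).2.2) := by
    intro fuel
    induction fuel with
    | zero => intro r0 r1 s0 s1 t0 t1 h; omega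
    | succ n ih =>
      intro r0 r1 s0 s1 t0 t1 h
      by_cases hr : r1 = 0
      · subst hr
        simp only [pvEgcdLoopF, pvEgcdAF]
        norm_num
      · simp only [pvEgcdLoopF, pvEgcdAF, hr, if_false]
        have hmodeq : r0 - PySem.Int.floordiv r0 r1 * r1 = PySem.Int.mod r0 r1 := by
          have := PySem.Int.floordiv_mul_add_mod r0 r1; omega
        have habs : (r0 - PySem.Int.floordiv r0 r1 * r1).natAbs < n := by
          rw [hmodeq]; have := pvModAbsLt r0 r1 hr; omega
        rw [ih r1 (r0 - PySem.Int.floordiv r0 r1 * r1) s1 (s0 - PySem.Int.floordiv r0 r1 * s1)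
              t1 (t0 - PySem.Int.floordiv r0 r1 * t1) habs, hmodeq]
        simp only [Prod.mk.injEq]
        refine ⟨by trivial, by ring, by ring⟩
  rw [pvEgcdLoop, key (r1.natAbs + 1) r0 r1 s0 s1 t0 t1 (by omega)]
  rfl

theorem pvFilterUnique (p : Int → Prop) [DecidablePred p] (k0 : Int) (hp : ∀ k, p k → k = k0) :
    ∀ (n : Nat) (a b : Int), (b - a).toNat = n →
    (PySem.List.pyRange a b 1).filter (fun k => decide (p k)) =
      if a ≤ k0 ∧ k0 < b ∧ p k0 then [k0] else [] := by
  intro n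
  induction n with
  | zero =>
    intro a b hn
    have hba : b ≤ a := by omega
    rw [PySem.List.pyRange_one_eq_nil hba, List.filter_nil, if_neg]
    rintro ⟨h1, h2, -⟩; omega
  | succ n ih =>
    intro a b hn
    have hab : a < b := by omega
    rw [PySem.List.pyRange_one_cons hab, List.filter_cons]
    by_cases hpa : p a
    · have ha0 : a = k0 := hp a hpa
      subst ha0
      rw [if_pos (show (fun k => decide (p k)) a = true by simp [hpa])]
      rw [ih (a + 1) b (by omega), if_neg (by rintro ⟨h1, -, -⟩; omega),
          if_pos ⟨le_refl a, hab, hpa⟩]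
    · rw [if_neg (show ¬((fun k => decide (p k)) a = true) by simp [hpa])]
      rw [ih (a + 1) b (by omega)]
      by_cases hc1 : a + 1 ≤ k0 ∧ k0 < b ∧ p k0
      · rw [if_pos hc1, if_pos ⟨by omega, hc1.2⟩]
      · rw [if_neg hc1, if_neg ?_]
        rintro ⟨u1, u2, u3⟩
        rcases eq_or_lt_of_le u1 with he | hlt
        · exact hpa (he ▸ u3)
        · exact hc1 ⟨by omega, u2, u3⟩

theorem pvFilterInterval (p : Int → Prop) [DecidablePred p] (lo hi : Int) :
    ∀ (n : Nat) (a b : Int), (b - a).toNat = n →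
    (∀ k, a ≤ k → k < b → (p k ↔ lo ≤ k ∧ k ≤ hi)) →
    (PySem.List.pyRange a b 1).filter (fun k => decide (p k)) =
      PySem.List.pyRange (max a lo) (min b (hi + 1)) 1 := by
  intro n
  induction n with
  | zero =>
    intro a b hn hp
    have hba : b ≤ a := by omega
    rw [PySem.List.pyRange_one_eq_nil hba, List.filter_nil,
        PySem.List.pyRange_one_eq_nil (by omega)]
  | succ n ih =>
    intro a b hn hp
    have hab : a < b := by omega
    rw [PySem.List.pyRange_one_cons hab, List.filter_cons]
    by_cases hpa : p a
    · have hwin : lo ≤ a ∧ a ≤ hi := (hp a (le_refl a) hab).1 hpa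
      rw [if_pos (show (fun k => decide (p k)) a = true by simp [hpa])]
      rw [ih (a + 1) b (by omega) (fun k h1 h2 => hp k (by omega) h2)]
      have e1 : max a lo = a := by omega
      have e2 : max (a + 1) lo = a + 1 := by omega
      rw [e1, e2, PySem.List.pyRange_one_cons (by omega : a < min b (hi + 1))]
    · have hwin : ¬(lo ≤ a ∧ a ≤ hi) := fun h => hpa ((hp a (le_refl a) hab).2 h)
      rw [if_neg (show ¬((fun k => decide (p k)) a = true) by simp [hpa])]
      rw [ih (a + 1) b (by omega) (fun k h1 h2 => hp k (by omega) h2)]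
      by_cases hlo : a < lo
      · have e1 : max (a + 1) lo = max a lo := by omega
        rw [e1]
      · have hhi : hi < a := by omega
        rw [PySem.List.pyRange_one_eq_nil (by omega), PySem.List.pyRange_one_eq_nil (by omega)]

theorem pvFloordivMulExact (k b g : Int) (hg : 0 < g) (hdvd : g ∣ b) :
    PySem.Int.floordiv (k * b) g = k * PySem.Int.floordiv b g := by
  obtain ⟨m, rfl⟩ := hdvd
  rw [PySem.Int.floordiv_eq_ediv_of_pos hg, PySem.Int.floordiv_eq_ediv_of_pos hg]
  rw [show k * (g * m) = g * (k * m) by ring, Int.mul_ediv_cancel_left _ (by omega),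
      Int.mul_ediv_cancel_left _ (by omega)]

theorem pvFloordivMulSelf (k d : Int) (hd : d ≠ 0) : PySem.Int.floordiv (k * d) d = k := by
  have h0 : PySem.Int.mod (k * d) d = 0 := (PySem.Int.mod_eq_zero_iff_dvd _ _).2 ⟨k, by ring⟩
  have h := PySem.Int.floordiv_mul_add_mod (k * d) d
  rw [h0] at h
  exact mul_right_cancel₀ hd (by linarith)


-- B's tail (everything after the diophantine setup), as a proof-side abbreviation
def pvTail (a2 b2 c2 x1 y1 sx sy : Int) : List (Int × Int) :=
  if a2 * sx - b2 * sy ≠ 0 then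
    if PySem.Int.mod (c2 - a2 * x1 - b2 * y1) (a2 * sx - b2 * sy) ≠ 0 then []
    else
      let k := PySem.Int.floordiv (c2 - a2 * x1 - b2 * y1) (a2 * sx - b2 * sy)
      if -1000000 ≤ k ∧ k ≤ 999999 ∧ 0 < x1 + k * sx ∧ 0 < y1 - k * sy then
        [(x1 + k * sx, y1 - k * sy)]
      else []
  else if c2 - a2 * x1 - b2 * y1 ≠ 0 then []
  else
    let xbound : Option (Int × Int) :=
      if 0 < sx then some (max (-1000000) (PySem.Int.floordiv (-x1) sx + 1), 999999)
      else if sx < 0 then some (-1000000, min 999999 (PySem.Int.floordiv (x1 - 1) (-sx)))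
      else if x1 ≤ 0 then none
      else some (-1000000, 999999)
    match xbound with
    | none => []
    | some (lo, hi) =>
      let bounds : Option (Int × Int) :=
        if 0 < sy then some (lo, min hi (PySem.Int.floordiv (y1 - 1) sy))
        else if sy < 0 then some (max lo (PySem.Int.floordiv (-y1) (-sy) + 1), hi)
        else if y1 ≤ 0 then none
        else some (lo, hi)
      match bounds with
      | none => []
      | some (lo, hi) =>
        (PySem.List.pyRange lo (hi + 1) 1).map (fun k => (x1 + k * sx, y1 - k * sy))

-- strict-positivity brackets via floor division
theorem pvBrLow (x s k : Int) (hs : 0 < s) :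
    0 < x + k * s ↔ PySem.Int.floordiv (-x) s + 1 ≤ k := by
  rw [Int.add_one_le_iff, PySem.Int.floordiv_lt_iff_lt_mul hs]
  constructor <;> intro h <;> linarith

theorem pvBrHigh (x s k : Int) (hs : 0 < s) :
    0 < x - k * s ↔ k ≤ PySem.Int.floordiv (x - 1) s := by
  rw [PySem.Int.le_floordiv_iff_mul_le hs]
  constructor <;> intro h <;> linarith

theorem pvCore (a2 b2 c2 x1 y1 sx sy : Int) :
    ((PySem.List.pyRange (-1000000) 1000000 1).filter
        (fun k => decide ((0 < x1 + k * sx ∧ 0 < y1 - k * sy) ∧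
          a2 * (x1 + k * sx) + b2 * (y1 - k * sy) = c2))).map
      (fun k => (x1 + k * sx, y1 - k * sy))
    = pvTail a2 b2 c2 x1 y1 sx sy := by
  have heq2 : ∀ k : Int, (a2 * (x1 + k * sx) + b2 * (y1 - k * sy) = c2) ↔
      k * (a2 * sx - b2 * sy) = c2 - a2 * x1 - b2 * y1 := by
    intro k
    have hid : a2 * (x1 + k * sx) + b2 * (y1 - k * sy) - c2
        = k * (a2 * sx - b2 * sy) - (c2 - a2 * x1 - b2 * y1) := by ring
    constructor <;> intro h <;> linarith
  simp only [pvTail]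
  by_cases hD : a2 * sx - b2 * sy = 0
  case neg =>
    rw [if_pos hD]
    by_cases hmod : PySem.Int.mod (c2 - a2 * x1 - b2 * y1) (a2 * sx - b2 * sy) = 0
    case pos =>
      rw [if_neg (by simpa using hmod)]
      have hKD : PySem.Int.floordiv (c2 - a2 * x1 - b2 * y1) (a2 * sx - b2 * sy) *
          (a2 * sx - b2 * sy) = c2 - a2 * x1 - b2 * y1 := by
        have := PySem.Int.floordiv_mul_add_mod (c2 - a2 * x1 - b2 * y1) (a2 * sx - b2 * sy)
        rw [hmod] at this; linarith
      have huniq : ∀ k : Int, ((0 < x1 + k * sx ∧ 0 < y1 - k * sy) ∧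
          a2 * (x1 + k * sx) + b2 * (y1 - k * sy) = c2) →
          k = PySem.Int.floordiv (c2 - a2 * x1 - b2 * y1) (a2 * sx - b2 * sy) := by
        intro k hk
        have h2 := (heq2 k).1 hk.2
        rw [← h2, pvFloordivMulSelf k _ hD]
      rw [pvFilterUnique _ _ huniq 2000000 (-1000000) 1000000 (by decide)]
      rw [apply_ite (List.map (fun k => (x1 + k * sx, y1 - k * sy)))]
      simp only [List.map_cons, List.map_nil]
      by_cases hca : -1000000 ≤ PySem.Int.floordiv (c2 - a2 * x1 - b2 * y1) (a2 * sx - b2 * sy) ∧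
          PySem.Int.floordiv (c2 - a2 * x1 - b2 * y1) (a2 * sx - b2 * sy) < 1000000 ∧
          ((0 < x1 + PySem.Int.floordiv (c2 - a2 * x1 - b2 * y1) (a2 * sx - b2 * sy) * sx ∧
            0 < y1 - PySem.Int.floordiv (c2 - a2 * x1 - b2 * y1) (a2 * sx - b2 * sy) * sy) ∧
           a2 * (x1 + PySem.Int.floordiv (c2 - a2 * x1 - b2 * y1) (a2 * sx - b2 * sy) * sx) +
             b2 * (y1 - PySem.Int.floordiv (c2 - a2 * x1 - b2 * y1) (a2 * sx - b2 * sy) * sy) = c2)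
      · rw [if_pos hca, if_pos ⟨hca.1, by omega, hca.2.2.1.1, hca.2.2.1.2⟩]
      · rw [if_neg hca, if_neg (fun hb => hca ⟨hb.1, by omega, ⟨hb.2.2.1, hb.2.2.2⟩,
          (heq2 _).2 hKD⟩)]
    case neg =>
      rw [if_pos (by simpa using hmod)]
      have huniq : ∀ k : Int, ((0 < x1 + k * sx ∧ 0 < y1 - k * sy) ∧
          a2 * (x1 + k * sx) + b2 * (y1 - k * sy) = c2) → k = 0 := by
        intro k hk
        exact absurd ((PySem.Int.mod_eq_zero_iff_dvd _ _).2 ⟨k, ((heq2 k).1 hk.2).symm.trans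
          (mul_comm k _)⟩) hmod
      rw [pvFilterUnique _ _ huniq 2000000 (-1000000) 1000000 (by decide)]
      rw [if_neg ?_, List.map_nil]
      rintro ⟨-, -, -, hk2⟩
      exact hmod ((PySem.Int.mod_eq_zero_iff_dvd _ _).2 ⟨0, by
        have := (heq2 0).1 hk2; linarith⟩)
  case pos =>
    rw [if_neg (by simpa using hD)]
    by_cases hR : c2 - a2 * x1 - b2 * y1 = 0
    case neg =>
      rw [if_pos (by simpa using hR)]
      have huniq : ∀ k : Int, ((0 < x1 + k * sx ∧ 0 < y1 - k * sy) ∧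
          a2 * (x1 + k * sx) + b2 * (y1 - k * sy) = c2) → k = 0 := by
        intro k hk
        have h2 := (heq2 k).1 hk.2
        rw [hD, mul_zero] at h2
        exact absurd h2.symm hR
      rw [pvFilterUnique _ _ huniq 2000000 (-1000000) 1000000 (by decide)]
      rw [if_neg ?_, List.map_nil]
      rintro ⟨-, -, -, hk2⟩
      have h2 := (heq2 0).1 hk2
      rw [hD, mul_zero] at h2
      exact hR h2.symm
    case pos =>
      rw [if_neg (by simpa using hR)]
      have hPiff : ∀ k : Int, ((0 < x1 + k * sx ∧ 0 < y1 - k * sy) ∧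
          a2 * (x1 + k * sx) + b2 * (y1 - k * sy) = c2) ↔
          (0 < x1 + k * sx ∧ 0 < y1 - k * sy) := by
        intro k
        constructor
        · exact fun h => h.1
        · exact fun h => ⟨h, (heq2 k).2 (by rw [hD, mul_zero, hR])⟩
      have hnil : ∀ B : List (Int × Int), B = [] →
          (∀ k : Int, -1000000 ≤ k → k < 1000000 →
            (((0 < x1 + k * sx ∧ 0 < y1 - k * sy) ∧
              a2 * (x1 + k * sx) + b2 * (y1 - k * sy) = c2) ↔ (1:Int) ≤ k ∧ k ≤ 0)) →
          ((PySem.List.pyRange (-1000000) 1000000 1).filter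
            (fun k => decide ((0 < x1 + k * sx ∧ 0 < y1 - k * sy) ∧
              a2 * (x1 + k * sx) + b2 * (y1 - k * sy) = c2))).map
            (fun k => (x1 + k * sx, y1 - k * sy)) = B := by
        intro B hB hwin
        rw [pvFilterInterval _ 1 0 2000000 (-1000000) 1000000 (by decide) hwin,
            PySem.List.pyRange_one_eq_nil (by omega), List.map_nil, hB]
      by_cases hsx : 0 < sx
      · by_cases hsy : 0 < sy
        · -- sx > 0, sy > 0
          have hwin : ∀ k : Int, -1000000 ≤ k → k < 1000000 →
              (((0 < x1 + k * sx ∧ 0 < y1 - k * sy) ∧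
                a2 * (x1 + k * sx) + b2 * (y1 - k * sy) = c2) ↔
               max (-1000000) (PySem.Int.floordiv (-x1) sx + 1) ≤ k ∧
               k ≤ min 999999 (PySem.Int.floordiv (y1 - 1) sy)) := by
            intro k h1 h2
            rw [hPiff k, pvBrLow x1 sx k hsx, pvBrHigh y1 sy k hsy]
            omega
          rw [pvFilterInterval _ _ _ 2000000 (-1000000) 1000000 (by decide) hwin]
          simp only [if_pos hsx, if_pos hsy]
          rw [show max (-1000000)
                (max (-1000000) (PySem.Int.floordiv (-x1) sx + 1)) =
              max (-1000000) (PySem.Int.floordiv (-x1) sx + 1) by omega,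
              show min 1000000 (min 999999 (PySem.Int.floordiv (y1 - 1) sy) + 1) =
              min 999999 (PySem.Int.floordiv (y1 - 1) sy) + 1 by omega]
        · by_cases hsy2 : sy < 0
          · -- sx > 0, sy < 0
            have hwin : ∀ k : Int, -1000000 ≤ k → k < 1000000 →
                (((0 < x1 + k * sx ∧ 0 < y1 - k * sy) ∧
                  a2 * (x1 + k * sx) + b2 * (y1 - k * sy) = c2) ↔
                 max (max (-1000000) (PySem.Int.floordiv (-x1) sx + 1))
                   (PySem.Int.floordiv (-y1) (-sy) + 1) ≤ k ∧ k ≤ 999999) := by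
              intro k h1 h2
              rw [hPiff k, pvBrLow x1 sx k hsx,
                  show y1 - k * sy = y1 + k * (-sy) by ring, pvBrLow y1 (-sy) k (by omega)]
              omega
            rw [pvFilterInterval _ _ _ 2000000 (-1000000) 1000000 (by decide) hwin]
            simp only [if_pos hsx, if_neg (show ¬(0 < sy) from hsy), if_pos hsy2]
            rw [show max (-1000000) (max (max (-1000000) (PySem.Int.floordiv (-x1) sx + 1))
                  (PySem.Int.floordiv (-y1) (-sy) + 1)) =
                max (max (-1000000) (PySem.Int.floordiv (-x1) sx + 1))
                  (PySem.Int.floordiv (-y1) (-sy) + 1) by omega,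
                show min 1000000 ((999999:Int) + 1) = 999999 + 1 by omega]
          · have hsy0 : sy = 0 := by omega
            by_cases hy1 : y1 ≤ 0
            · -- sx > 0, sy = 0, y1 ≤ 0 : empty
              refine hnil _ ?_ ?_
              · simp only [if_pos hsx, if_neg (show ¬(0 < sy) from hsy),
                  if_neg (show ¬(sy < 0) from hsy2), if_pos hy1]
              · intro k h1 h2
                rw [hPiff k]
                constructor
                · rintro ⟨-, hy⟩; rw [hsy0, mul_zero] at hy; omega
                · omega
            · -- sx > 0, sy = 0, y1 > 0
              have hwin : ∀ k : Int, -1000000 ≤ k → k < 1000000 →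
                  (((0 < x1 + k * sx ∧ 0 < y1 - k * sy) ∧
                    a2 * (x1 + k * sx) + b2 * (y1 - k * sy) = c2) ↔
                   max (-1000000) (PySem.Int.floordiv (-x1) sx + 1) ≤ k ∧ k ≤ 999999) := by
                intro k h1 h2
                rw [hPiff k, pvBrLow x1 sx k hsx, hsy0, mul_zero]
                omega
              rw [pvFilterInterval _ _ _ 2000000 (-1000000) 1000000 (by decide) hwin]
              simp only [if_pos hsx, if_neg (show ¬(0 < sy) from hsy),
                if_neg (show ¬(sy < 0) from hsy2), if_neg hy1]
              rw [show max (-1000000)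
                    (max (-1000000) (PySem.Int.floordiv (-x1) sx + 1)) =
                  max (-1000000) (PySem.Int.floordiv (-x1) sx + 1) by omega,
                  show min 1000000 ((999999:Int) + 1) = 999999 + 1 by omega]
      · by_cases hsx2 : sx < 0
        · by_cases hsy : 0 < sy
          · -- sx < 0, sy > 0
            have hwin : ∀ k : Int, -1000000 ≤ k → k < 1000000 →
                (((0 < x1 + k * sx ∧ 0 < y1 - k * sy) ∧
                  a2 * (x1 + k * sx) + b2 * (y1 - k * sy) = c2) ↔
                 (-1000000 : Int) ≤ k ∧
                 k ≤ min (min 999999 (PySem.Int.floordiv (x1 - 1) (-sx)))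
                   (PySem.Int.floordiv (y1 - 1) sy)) := by
              intro k h1 h2
              rw [hPiff k, show x1 + k * sx = x1 - k * (-sx) by ring,
                  pvBrHigh x1 (-sx) k (by omega), pvBrHigh y1 sy k hsy]
              omega
            rw [pvFilterInterval _ _ _ 2000000 (-1000000) 1000000 (by decide) hwin]
            simp only [if_neg (show ¬(0 < sx) from hsx), if_pos hsx2, if_pos hsy]
            rw [show max (-1000000) (-1000000 : Int) = -1000000 by omega,
                show min 1000000 (min (min 999999 (PySem.Int.floordiv (x1 - 1) (-sx)))
                    (PySem.Int.floordiv (y1 - 1) sy) + 1) =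
                  min (min 999999 (PySem.Int.floordiv (x1 - 1) (-sx)))
                    (PySem.Int.floordiv (y1 - 1) sy) + 1 by omega]
          · by_cases hsy2 : sy < 0
            · -- sx < 0, sy < 0
              have hwin : ∀ k : Int, -1000000 ≤ k → k < 1000000 →
                  (((0 < x1 + k * sx ∧ 0 < y1 - k * sy) ∧
                    a2 * (x1 + k * sx) + b2 * (y1 - k * sy) = c2) ↔
                   max (-1000000) (PySem.Int.floordiv (-y1) (-sy) + 1) ≤ k ∧
                   k ≤ min 999999 (PySem.Int.floordiv (x1 - 1) (-sx))) := by
                intro k h1 h2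
                rw [hPiff k, show x1 + k * sx = x1 - k * (-sx) by ring,
                    pvBrHigh x1 (-sx) k (by omega),
                    show y1 - k * sy = y1 + k * (-sy) by ring, pvBrLow y1 (-sy) k (by omega)]
                omega
              rw [pvFilterInterval _ _ _ 2000000 (-1000000) 1000000 (by decide) hwin]
              simp only [if_neg (show ¬(0 < sx) from hsx), if_pos hsx2,
                if_neg (show ¬(0 < sy) from hsy), if_pos hsy2]
              rw [show max (-1000000)
                    (max (-1000000) (PySem.Int.floordiv (-y1) (-sy) + 1)) =
                  max (-1000000) (PySem.Int.floordiv (-y1) (-sy) + 1) by omega,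
                  show min 1000000 (min 999999 (PySem.Int.floordiv (x1 - 1) (-sx)) + 1) =
                  min 999999 (PySem.Int.floordiv (x1 - 1) (-sx)) + 1 by omega]
            · have hsy0 : sy = 0 := by omega
              by_cases hy1 : y1 ≤ 0
              · -- sx < 0, sy = 0, y1 ≤ 0 : empty
                refine hnil _ ?_ ?_
                · simp only [if_neg (show ¬(0 < sx) from hsx), if_pos hsx2,
                    if_neg (show ¬(0 < sy) from hsy), if_neg (show ¬(sy < 0) from hsy2),
                    if_pos hy1]
                · intro k h1 h2
                  rw [hPiff k]
                  constructor
                  · rintro ⟨-, hy⟩; rw [hsy0, mul_zero] at hy; omega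
                  · omega
              · -- sx < 0, sy = 0, y1 > 0
                have hwin : ∀ k : Int, -1000000 ≤ k → k < 1000000 →
                    (((0 < x1 + k * sx ∧ 0 < y1 - k * sy) ∧
                      a2 * (x1 + k * sx) + b2 * (y1 - k * sy) = c2) ↔
                     (-1000000 : Int) ≤ k ∧
                     k ≤ min 999999 (PySem.Int.floordiv (x1 - 1) (-sx))) := by
                  intro k h1 h2
                  rw [hPiff k, show x1 + k * sx = x1 - k * (-sx) by ring,
                      pvBrHigh x1 (-sx) k (by omega), hsy0, mul_zero]
                  omega
                rw [pvFilterInterval _ _ _ 2000000 (-1000000) 1000000 (by decide) hwin]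
                simp only [if_neg (show ¬(0 < sx) from hsx), if_pos hsx2,
                  if_neg (show ¬(0 < sy) from hsy), if_neg (show ¬(sy < 0) from hsy2),
                  if_neg hy1]
                rw [show max (-1000000) (-1000000 : Int) = -1000000 by omega,
                    show min 1000000 (min 999999 (PySem.Int.floordiv (x1 - 1) (-sx)) + 1) =
                    min 999999 (PySem.Int.floordiv (x1 - 1) (-sx)) + 1 by omega]
        · have hsx0 : sx = 0 := by omega
          by_cases hx1 : x1 ≤ 0
          · -- sx = 0, x1 ≤ 0 : empty
            refine hnil _ ?_ ?_
            · simp only [if_neg (show ¬(0 < sx) from hsx), if_neg (show ¬(sx < 0) from hsx2),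
                if_pos hx1]
            · intro k h1 h2
              rw [hPiff k]
              constructor
              · rintro ⟨hx, -⟩; rw [hsx0, mul_zero] at hx; omega
              · omega
          · by_cases hsy : 0 < sy
            · -- sx = 0, x1 > 0, sy > 0
              have hwin : ∀ k : Int, -1000000 ≤ k → k < 1000000 →
                  (((0 < x1 + k * sx ∧ 0 < y1 - k * sy) ∧
                    a2 * (x1 + k * sx) + b2 * (y1 - k * sy) = c2) ↔
                   (-1000000 : Int) ≤ k ∧
                   k ≤ min 999999 (PySem.Int.floordiv (y1 - 1) sy)) := by
                intro k h1 h2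
                rw [hPiff k, pvBrHigh y1 sy k hsy, hsx0, mul_zero]
                omega
              rw [pvFilterInterval _ _ _ 2000000 (-1000000) 1000000 (by decide) hwin]
              simp only [if_neg (show ¬(0 < sx) from hsx), if_neg (show ¬(sx < 0) from hsx2),
                if_neg hx1, if_pos hsy]
              rw [show max (-1000000) (-1000000 : Int) = -1000000 by omega,
                  show min 1000000 (min 999999 (PySem.Int.floordiv (y1 - 1) sy) + 1) =
                  min 999999 (PySem.Int.floordiv (y1 - 1) sy) + 1 by omega]
            · by_cases hsy2 : sy < 0
              · -- sx = 0, x1 > 0, sy < 0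
                have hwin : ∀ k : Int, -1000000 ≤ k → k < 1000000 →
                    (((0 < x1 + k * sx ∧ 0 < y1 - k * sy) ∧
                      a2 * (x1 + k * sx) + b2 * (y1 - k * sy) = c2) ↔
                     max (-1000000) (PySem.Int.floordiv (-y1) (-sy) + 1) ≤ k ∧
                     k ≤ (999999 : Int)) := by
                  intro k h1 h2
                  rw [hPiff k, show y1 - k * sy = y1 + k * (-sy) by ring,
                      pvBrLow y1 (-sy) k (by omega), hsx0, mul_zero]
                  omega
                rw [pvFilterInterval _ _ _ 2000000 (-1000000) 1000000 (by decide) hwin]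
                simp only [if_neg (show ¬(0 < sx) from hsx),
                  if_neg (show ¬(sx < 0) from hsx2), if_neg hx1,
                  if_neg (show ¬(0 < sy) from hsy), if_pos hsy2]
                rw [show max (-1000000)
                      (max (-1000000) (PySem.Int.floordiv (-y1) (-sy) + 1)) =
                    max (-1000000) (PySem.Int.floordiv (-y1) (-sy) + 1) by omega,
                    show min 1000000 ((999999:Int) + 1) = 999999 + 1 by omega]
              · have hsy0 : sy = 0 := by omega
                by_cases hy1 : y1 ≤ 0
                · -- sx = 0, x1 > 0, sy = 0, y1 ≤ 0 : empty
                  refine hnil _ ?_ ?_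
                  · simp only [if_neg (show ¬(0 < sx) from hsx),
                      if_neg (show ¬(sx < 0) from hsx2), if_neg hx1,
                      if_neg (show ¬(0 < sy) from hsy), if_neg (show ¬(sy < 0) from hsy2),
                      if_pos hy1]
                  · intro k h1 h2
                    rw [hPiff k]
                    constructor
                    · rintro ⟨-, hy⟩; rw [hsy0, mul_zero] at hy; omega
                    · omega
                · -- sx = 0, x1 > 0, sy = 0, y1 > 0 : full window
                  have hwin : ∀ k : Int, -1000000 ≤ k → k < 1000000 →
                      (((0 < x1 + k * sx ∧ 0 < y1 - k * sy) ∧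
                        a2 * (x1 + k * sx) + b2 * (y1 - k * sy) = c2) ↔
                       (-1000000 : Int) ≤ k ∧ k ≤ (999999 : Int)) := by
                    intro k h1 h2
                    rw [hPiff k, hsx0, hsy0, mul_zero]
                    omega
                  rw [pvFilterInterval _ _ _ 2000000 (-1000000) 1000000 (by decide) hwin]
                  simp only [if_neg (show ¬(0 < sx) from hsx),
                    if_neg (show ¬(sx < 0) from hsx2), if_neg hx1,
                    if_neg (show ¬(0 < sy) from hsy), if_neg (show ¬(sy < 0) from hsy2),
                    if_neg hy1]
                  rw [show max (-1000000) (-1000000 : Int) = -1000000 by omega,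
                      show min 1000000 ((999999:Int) + 1) = 999999 + 1 by omega]


theorem pvAltEq (a1 b1 c1 a2 b2 c2 g u v : Int)
    (hE : pvEgcdA (a1.natAbs : Int) (b1.natAbs : Int) = (g, u, v))
    (hg : g ≠ 0) (hmodc : PySem.Int.mod c1 g = 0) :
    find_positive_solutions_alt a1 b1 c1 a2 b2 c2 =
      pvTail a2 b2 c2
        (if a1 < 0 then -(u * PySem.Int.floordiv c1 g) else u * PySem.Int.floordiv c1 g)
        (if b1 < 0 then -(v * PySem.Int.floordiv c1 g) else v * PySem.Int.floordiv c1 g)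
        (PySem.Int.floordiv b1 g) (PySem.Int.floordiv a1 g) := by
  have hLoop : pvEgcdLoop (a1.natAbs : Int) (b1.natAbs : Int) 1 0 0 1 = (g, u, v) := by
    rw [pvEgcdLoop_eq, hE]
    norm_num
  simp only [find_positive_solutions_alt, pvTail, hLoop]
  rw [if_neg (by simp [hg, hmodc])]
  rw [show u * PySem.Int.floordiv c1 g * (if a1 < 0 then -1 else 1) =
        (if a1 < 0 then -(u * PySem.Int.floordiv c1 g) else u * PySem.Int.floordiv c1 g) by
      split_ifs <;> ring,
      show v * PySem.Int.floordiv c1 g * (if b1 < 0 then -1 else 1) =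
        (if b1 < 0 then -(v * PySem.Int.floordiv c1 g) else v * PySem.Int.floordiv c1 g) by
      split_ifs <;> ring]

theorem pvFoldShape (a2 b2 c2 x1 y1 sx sy : Int) (l : List Int) :
    l.foldl (fun solutions k1 =>
      let x := x1 + k1 * sx
      let y := y1 - k1 * sy
      if 0 < x ∧ 0 < y then
        if a2 * x + b2 * y = c2 then solutions ++ [(x, y)] else solutions
      else solutions) []
    = (l.filter (fun k => decide ((0 < x1 + k * sx ∧ 0 < y1 - k * sy) ∧
        a2 * (x1 + k * sx) + b2 * (y1 - k * sy) = c2))).map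
      (fun k => (x1 + k * sx, y1 - k * sy)) := by
  have hfun : (fun (solutions : List (Int × Int)) (k1 : Int) =>
      let x := x1 + k1 * sx
      let y := y1 - k1 * sy
      if 0 < x ∧ 0 < y then
        if a2 * x + b2 * y = c2 then solutions ++ [(x, y)] else solutions
      else solutions)
      = (fun solutions k1 =>
        if (0 < x1 + k1 * sx ∧ 0 < y1 - k1 * sy) ∧
            a2 * (x1 + k1 * sx) + b2 * (y1 - k1 * sy) = c2 then
          solutions ++ [(x1 + k1 * sx, y1 - k1 * sy)]
        else solutions) := by
    funext sol k
    by_cases h1 : 0 < x1 + k * sx ∧ 0 < y1 - k * sy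
    · by_cases h2 : a2 * (x1 + k * sx) + b2 * (y1 - k * sy) = c2
      · show (if _ then if _ then _ else _ else _) = _
        rw [if_pos h1, if_pos h2, if_pos ⟨h1, h2⟩]
      · show (if _ then if _ then _ else _ else _) = _
        rw [if_pos h1, if_neg h2, if_neg (fun hc => h2 hc.2)]
    · show (if _ then if _ then _ else _ else _) = _
      rw [if_neg h1, if_neg (fun hc => h1 hc.1)]
  rw [hfun, PySem.List.foldl_append_ite _ _, List.nil_append]

theorem pvAEq (a1 b1 c1 a2 b2 c2 g u v w1 w2 w3 : Int)
    (hE : pvEgcdA (a1.natAbs : Int) (b1.natAbs : Int) = (g, u, v))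
    (hg : 0 < g) (hga : g ∣ a1) (hgb : g ∣ b1)
    (hmodc : PySem.Int.mod c1 g = 0)
    (hs2 : pvSolveDio a2 b2 c2 = some (w1, w2, w3)) :
    find_positive_solutions a1 b1 c1 a2 b2 c2 =
      ((PySem.List.pyRange (-1000000) 1000000 1).filter
        (fun k => decide
          ((0 < (if a1 < 0 then -(u * PySem.Int.floordiv c1 g) else u * PySem.Int.floordiv c1 g)
              + k * PySem.Int.floordiv b1 g ∧
            0 < (if b1 < 0 then -(v * PySem.Int.floordiv c1 g) else v * PySem.Int.floordiv c1 g)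
              - k * PySem.Int.floordiv a1 g) ∧
           a2 * ((if a1 < 0 then -(u * PySem.Int.floordiv c1 g) else u * PySem.Int.floordiv c1 g)
              + k * PySem.Int.floordiv b1 g) +
           b2 * ((if b1 < 0 then -(v * PySem.Int.floordiv c1 g) else v * PySem.Int.floordiv c1 g)
              - k * PySem.Int.floordiv a1 g) = c2))).map
        (fun k =>
          ((if a1 < 0 then -(u * PySem.Int.floordiv c1 g) else u * PySem.Int.floordiv c1 g)
              + k * PySem.Int.floordiv b1 g,
           (if b1 < 0 then -(v * PySem.Int.floordiv c1 g) else v * PySem.Int.floordiv c1 g)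
              - k * PySem.Int.floordiv a1 g)) := by
  have hs1 : pvSolveDio a1 b1 c1 = some (g,
      (if a1 < 0 then -(u * PySem.Int.floordiv c1 g) else u * PySem.Int.floordiv c1 g),
      (if b1 < 0 then -(v * PySem.Int.floordiv c1 g) else v * PySem.Int.floordiv c1 g)) := by
    simp only [pvSolveDio, hE]
    rw [if_neg (by simp [hmodc])]
  unfold find_positive_solutions
  rw [hs1, hs2]
  dsimp only
  have hb' : ∀ k : Int, PySem.Int.floordiv (k * b1) g = k * PySem.Int.floordiv b1 g :=
    fun k => pvFloordivMulExact k b1 g hg hgb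
  have ha' : ∀ k : Int, PySem.Int.floordiv (k * a1) g = k * PySem.Int.floordiv a1 g :=
    fun k => pvFloordivMulExact k a1 g hg hga
  simp only [hb', ha']
  exact pvFoldShape a2 b2 c2 _ _ _ _ _

-- ===== VERDICT (by name: the statement is the Claim_ definition above) =====
theorem find_positive_solutions_spec : Claim_equal_find_positive_solutions := by
  intro a1 b1 c1 a2 b2 c2 _hdom hpre
  obtain ⟨hz1, hz2, hdvd1, hdvd2⟩ := hpre
  unfold Spec_find_positive_solutions
  obtain ⟨⟨g, u, v⟩, hE⟩ : ∃ t, pvEgcdA (a1.natAbs : Int) (b1.natAbs : Int) = t := ⟨_, rfl⟩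
  have hgval : g = (Int.gcd a1 b1 : Int) := by
    have h := pvEgcdA_fst (a1.natAbs : Int) (b1.natAbs : Int)
      (Int.natCast_nonneg _) (Int.natCast_nonneg _)
    rw [hE] at h
    simpa [Int.gcd, Int.natAbs_abs] using h
  have hgpos : 0 < g := by
    rw [hgval]
    exact_mod_cast Int.gcd_pos_iff.mpr (by tauto)
  have hga : g ∣ a1 := hgval ▸ Int.gcd_dvd_left a1 b1
  have hgb : g ∣ b1 := hgval ▸ Int.gcd_dvd_right a1 b1
  have hmodc : PySem.Int.mod c1 g = 0 := (PySem.Int.mod_eq_zero_iff_dvd _ _).2 (hgval ▸ hdvd1)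
  obtain ⟨⟨g2, u2, v2⟩, hE2⟩ : ∃ t, pvEgcdA (a2.natAbs : Int) (b2.natAbs : Int) = t := ⟨_, rfl⟩
  have hg2val : g2 = (Int.gcd a2 b2 : Int) := by
    have h := pvEgcdA_fst (a2.natAbs : Int) (b2.natAbs : Int)
      (Int.natCast_nonneg _) (Int.natCast_nonneg _)
    rw [hE2] at h
    simpa [Int.gcd, Int.natAbs_abs] using h
  have hmodc2 : PySem.Int.mod c2 g2 = 0 := (PySem.Int.mod_eq_zero_iff_dvd _ _).2 (hg2val ▸ hdvd2)
  have hs2 : pvSolveDio a2 b2 c2 = some (g2,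
      (if a2 < 0 then -(u2 * PySem.Int.floordiv c2 g2) else u2 * PySem.Int.floordiv c2 g2),
      (if b2 < 0 then -(v2 * PySem.Int.floordiv c2 g2) else v2 * PySem.Int.floordiv c2 g2)) := by
    simp only [pvSolveDio, hE2]
    rw [if_neg (by simp [hmodc2])]
  rw [pvAEq a1 b1 c1 a2 b2 c2 g u v _ _ _ hE hgpos hga hgb hmodc hs2,
      pvAltEq a1 b1 c1 a2 b2 c2 g u v hE (by omega) hmodc]
  exact pvCore a2 b2 c2 _ _ _ _

theorem find_positive_solutions_raises : Claim_raises_find_positive_solutions := by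
  unfold Claim_raises_find_positive_solutions
  constructor
  · intro a1 b1 c1 a2 b2 c2 _ hr hp
    unfold Raises_find_positive_solutions at hr
    unfold Pre_find_positive_solutions at hp
    tauto
  · exact ⟨by decide, by decide, by decide⟩

-- self-check: the two halves of the raises claim, re-assembled (also marks the theorem as consumed)
theorem find_positive_solutions_raises_ok : Claim_raises_find_positive_solutions :=
  And.intro find_positive_solutions_raises.1 find_positive_solutions_raises.2
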